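-- pv_equiv track=rewrite | github.com/tiago2904santos/Central-de-Viagens-2.0 | documentos/services/exportacao_google_drive.py | _labels_from_destinos_json
-- ===== SOURCE A (Python) =====
-- def _labels_from_destinos_json(destinos_json) -> list[str]:
--     labels: list[str] = []
--     seen: set[str] = set()
--
--     def remember(label: str) -> None:
--         value = (label or "").strip()
--         if not value or value in seen:
--             return
--         seen.add(value)
--         labels.append(value)
--
--     for destino in destinos_json or []:
--         if not isinstance(destino, dict):
--             continue
--         cidade = (destino.get("cidade_nome") or "").strip()
--         uf = (destino.get("estado_sigla") or "").strip().upper()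
--         if cidade and uf:
--             remember(f"{cidade} {uf}")
--         elif cidade:
--             remember(cidade)
--
--     return labels
-- ===== SOURCE B (Python) =====
-- def _label(destino):
--     if not isinstance(destino, dict):
--         return ""
--     cidade = (destino.get("cidade_nome") or "").strip()
--     uf = (destino.get("estado_sigla") or "").strip().upper()
--     return f"{cidade} {uf}" if cidade and uf else cidade
--
--
-- def _nub(labels):
--     # recursive first-occurrence dedup: emit the head, then recurse on the
--     # tail with every later duplicate of the head filtered out
--     if not labels:
--         return []
--     head = labels[0]
--     return [head] + _nub([x for x in labels[1:] if x != head])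
--
--
-- def _labels_from_destinos_json(destinos_json) -> list[str]:
--     candidates = [lab for destino in (destinos_json or []) if (lab := _label(destino))]
--     return _nub(candidates)
-- ===== Notes on version B (the rewrite author's own statement) =====
-- stated objective: alternative
-- what changed: Replaced A's single pass threading a mutable seen-set through a nested remember closure by two stages: a comprehension building the candidate labels, then a recursive filter-based nub (emit the head, recurse on the tail with the head's later duplicates filtered out) that keeps first occurrences with no auxiliary seen structure.
import Mathlib
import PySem

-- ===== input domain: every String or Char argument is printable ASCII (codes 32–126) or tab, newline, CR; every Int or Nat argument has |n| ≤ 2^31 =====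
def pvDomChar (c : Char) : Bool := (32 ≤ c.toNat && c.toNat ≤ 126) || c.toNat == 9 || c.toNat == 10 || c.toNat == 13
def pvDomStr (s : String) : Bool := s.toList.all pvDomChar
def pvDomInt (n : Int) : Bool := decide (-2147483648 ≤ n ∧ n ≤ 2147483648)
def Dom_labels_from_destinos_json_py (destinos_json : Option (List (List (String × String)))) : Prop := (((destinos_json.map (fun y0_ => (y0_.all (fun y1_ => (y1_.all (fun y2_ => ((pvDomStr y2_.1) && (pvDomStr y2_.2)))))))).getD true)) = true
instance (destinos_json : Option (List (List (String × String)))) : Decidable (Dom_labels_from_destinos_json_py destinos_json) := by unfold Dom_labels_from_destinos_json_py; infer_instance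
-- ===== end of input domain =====

-- B replaces A's single pass with a mutable seen-set threaded through a nested `remember`
-- closure by two stages: a build pass producing the candidate labels, then a recursive
-- filter-based nub (emit the head, recurse on the tail with the head's later duplicates
-- removed) that needs no auxiliary seen structure; objective: alternative.

-- ===== PORT A =====
-- `destino.get(k) or ""`: get? returns none for a missing key, and an empty value is replaced by ""
-- — both collapse to (get? …).getD "".
def pyRemember (st : List String × PySem.Set String) (label : String) :
    List String × PySem.Set String :=
  let value := PySem.Str.strip label
  if value = "" || PySem.Set.contains st.2 value then st
  else (st.1 ++ [value], PySem.Set.add st.2 value)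

def labels_from_destinos_json_py (destinos_json : Option (List (List (String × String)))) : List String :=
  ((destinos_json.getD []).foldl
    (fun st destino =>
      let cidade := PySem.Str.strip ((PySem.Dict.get? ⟨destino⟩ "cidade_nome").getD "")
      let uf := PySem.Str.upper (PySem.Str.strip ((PySem.Dict.get? ⟨destino⟩ "estado_sigla").getD ""))
      if cidade ≠ "" ∧ uf ≠ "" then pyRemember st (cidade ++ " " ++ uf)
      else if cidade ≠ "" then pyRemember st cidade
      else st)
    ([], PySem.Set.empty)).1

-- ===== PORT B =====
def altLabel (destino : List (String × String)) : String :=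
  let cidade := PySem.Str.strip ((PySem.Dict.get? ⟨destino⟩ "cidade_nome").getD "")
  let uf := PySem.Str.upper (PySem.Str.strip ((PySem.Dict.get? ⟨destino⟩ "estado_sigla").getD ""))
  if cidade ≠ "" ∧ uf ≠ "" then cidade ++ " " ++ uf else cidade

-- Source B's _nub: recursive first-occurrence dedup by filtering the head out of the tail
def pvNub : List String → List String
  | [] => []
  | x :: xs => x :: pvNub (xs.filter (fun y => y ≠ x))
termination_by l => l.length
decreasing_by simpa using Nat.lt_succ_of_le ((List.length_filter_le _ _).trans (by simp))

def labels_from_destinos_json_py_alt (destinos_json : Option (List (List (String × String)))) : List String :=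
  pvNub (((destinos_json.getD []).map altLabel).filter (fun s => s ≠ ""))

-- ===== PRECONDITION & SPEC =====
def Spec_labels_from_destinos_json_py (destinos_json : Option (List (List (String × String)))) (out : List String) : Prop := out = labels_from_destinos_json_py_alt destinos_json
instance (destinos_json : Option (List (List (String × String)))) (out : List String) : Decidable (Spec_labels_from_destinos_json_py destinos_json out) := by unfold Spec_labels_from_destinos_json_py; infer_instance

-- ===== CLAIM (what is proved, stated in full; the proofs are below) =====
def Claim_equal_labels_from_destinos_json_py : Prop := ∀ (destinos_json : Option (List (List (String × String)))), Dom_labels_from_destinos_json_py destinos_json → Spec_labels_from_destinos_json_py destinos_json (labels_from_destinos_json_py destinos_json)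

-- ===== LEMMAS AND PROOFS =====

-- strip leaves a string unchanged when its first and last characters are not whitespace
theorem pv_lstrip_eq_self {cs : List Char}
    (h : ∀ c, cs.head? = some c → PySem.Chars.isspace c = false) :
    PySem.Chars.lstrip cs = cs := by
  cases cs with
  | nil => rfl
  | cons a t => simp [PySem.Chars.lstrip, h a rfl]

theorem pv_rstrip_eq_self {cs : List Char}
    (h : ∀ c, cs.getLast? = some c → PySem.Chars.isspace c = false) :
    PySem.Chars.rstrip cs = cs := by
  unfold PySem.Chars.rstrip
  rw [show List.dropWhile PySem.Chars.isspace cs.reverse = PySem.Chars.lstrip cs.reverse from rfl]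
  rw [pv_lstrip_eq_self (by simpa using h), List.reverse_reverse]

theorem pv_head_lstrip {cs : List Char} {c : Char}
    (h : (PySem.Chars.lstrip cs).head? = some c) : PySem.Chars.isspace c = false := by
  unfold PySem.Chars.lstrip at h
  have hne : List.dropWhile PySem.Chars.isspace cs ≠ [] := by
    intro hnil; rw [hnil] at h; simp at h
  have hh := List.head_dropWhile_not PySem.Chars.isspace hne
  rw [List.head?_eq_some_head hne] at h
  have hc := Option.some_injective _ h
  rw [← hc]
  exact hh

theorem pv_head_strip {cs : List Char} {c : Char}
    (h : (PySem.Chars.strip cs).head? = some c) : PySem.Chars.isspace c = false := by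
  unfold PySem.Chars.strip PySem.Chars.rstrip at h
  set y := PySem.Chars.lstrip cs with hy
  have hsuf : List.dropWhile PySem.Chars.isspace y.reverse <:+ y.reverse := List.dropWhile_suffix _
  obtain ⟨t, ht⟩ := hsuf
  have : y = (List.dropWhile PySem.Chars.isspace y.reverse).reverse ++ t.reverse := by
    have := congrArg List.reverse ht
    simpa using this.symm
  apply pv_head_lstrip (cs := cs) (c := c)
  rw [← hy, this]
  rcases he : (List.dropWhile PySem.Chars.isspace y.reverse).reverse with _ | ⟨a, r⟩
  · rw [he] at h; simp at h
  · rw [he] at h; simp at h; simp [h]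

theorem pv_getLast_strip {cs : List Char} {c : Char}
    (h : (PySem.Chars.strip cs).getLast? = some c) : PySem.Chars.isspace c = false := by
  unfold PySem.Chars.strip PySem.Chars.rstrip at h
  rw [← List.head?_reverse, List.reverse_reverse] at h
  exact pv_head_lstrip (cs := (PySem.Chars.lstrip cs).reverse) h

theorem pv_isspace_upperChar {c : Char} (h : PySem.Chars.isspace c = false) :
    PySem.Chars.isspace (PySem.Chars.upperChar c) = false := by
  unfold PySem.Chars.upperChar
  split_ifs with hl
  · unfold PySem.Chars.islower at hl
    simp only [Bool.and_eq_true, decide_eq_true_eq] at hl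
    have h1 : 97 ≤ c.toNat := by
      have := hl.1; simpa [Char.le_def, UInt32.le_iff_toNat_le] using this
    have h2 : c.toNat ≤ 122 := by
      have := hl.2; simpa [Char.le_def, UInt32.le_iff_toNat_le] using this
    have hv : (c.toNat - 32).isValidChar := by
      left; omega
    have ht : (Char.ofNat (c.toNat - 32)).toNat = c.toNat - 32 := by
      rw [Char.toNat_ofNat]; simp [hv]
    unfold PySem.Chars.isspace
    simp only [ht]
    simp only [Bool.or_eq_false_iff, Bool.and_eq_false_iff, decide_eq_false_iff_not]
    refine ⟨⟨⟨⟨⟨⟨⟨⟨⟨⟨⟨?_, ?_⟩, ?_⟩, ?_⟩, ?_⟩, ?_⟩, ?_⟩, ?_⟩, ?_⟩, ?_⟩, ?_⟩, ?_⟩ <;> omega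
  · exact h

-- strip is the identity on an already-stripped nonempty string and on "cidade uf"
theorem pv_strip_eq_self {cs : List Char}
    (hh : ∀ c, cs.head? = some c → PySem.Chars.isspace c = false)
    (hl : ∀ c, cs.getLast? = some c → PySem.Chars.isspace c = false) :
    PySem.Chars.strip cs = cs := by
  unfold PySem.Chars.strip
  rw [pv_lstrip_eq_self hh, pv_rstrip_eq_self hl]

theorem pv_strip_idem (s : String) :
    PySem.Str.strip (PySem.Str.strip s) = PySem.Str.strip s := by
  unfold PySem.Str.strip
  rw [String.toList_ofList]
  congr 1
  exact pv_strip_eq_self (fun _ hc => pv_head_strip hc) (fun _ hc => pv_getLast_strip hc)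

theorem pv_strip_cat (x y : String)
    (hx : PySem.Str.strip x ≠ "")
    (hy : PySem.Str.upper (PySem.Str.strip y) ≠ "") :
    PySem.Str.strip (PySem.Str.strip x ++ " " ++ PySem.Str.upper (PySem.Str.strip y))
      = PySem.Str.strip x ++ " " ++ PySem.Str.upper (PySem.Str.strip y) := by
  set a := PySem.Str.strip x
  set b := PySem.Str.upper (PySem.Str.strip y) with hb
  have hal : a.toList ≠ [] := by
    intro hnil; apply hx; rw [← String.ofList_toList (s := a), hnil]
  have hbl : b.toList ≠ [] := by
    intro hnil; apply hy; rw [← String.ofList_toList (s := b), hnil]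
  have htl : (a ++ " " ++ b).toList = a.toList ++ ' ' :: b.toList := by
    simp [String.toList_append]
  conv_lhs => rw [PySem.Str.strip, htl]
  rw [show PySem.Chars.strip (a.toList ++ ' ' :: b.toList) = a.toList ++ ' ' :: b.toList from ?_]
  · rw [← htl, String.ofList_toList]
  apply pv_strip_eq_self
  · intro c hc
    rw [List.head?_append_of_ne_nil _ hal] at hc
    have : (PySem.Chars.strip x.toList).head? = some c := by
      rw [← PySem.Str.toList_strip]; exact hc
    exact pv_head_strip this
  · intro c hc
    rw [show a.toList ++ ' ' :: b.toList = (a.toList ++ [' ']) ++ b.toList by simp] at hc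
    rw [List.getLast?_append] at hc
    rcases hgb : b.toList.getLast? with _ | ⟨cb⟩
    · exact absurd (List.getLast?_eq_none_iff.mp hgb) hbl
    · rw [hgb] at hc
      simp at hc
      subst hc
      have hub : (PySem.Chars.upper (PySem.Chars.strip y.toList)).getLast? = some cb := by
        rw [← PySem.Str.toList_strip, ← PySem.Str.toList_upper]; exact hgb
      rw [PySem.Chars.upper, List.getLast?_map] at hub
      rcases hgy : (PySem.Chars.strip y.toList).getLast? with _ | ⟨cy⟩
      · rw [hgy] at hub; simp at hub
      · rw [hgy] at hub; simp at hub
        rw [← hub]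
        exact pv_isspace_upperChar (pv_getLast_strip (cs := y.toList) hgy)

theorem pv_nonempty_cat (a b : String) (_ : a ≠ "") :
    a ++ " " ++ b ≠ "" := by
  intro h
  have := congrArg String.toList h
  simp [String.toList_append] at this

-- per-destino step function A's fold reduces to
def pvStep (acc : PySem.Set String) (destino : List (String × String)) : PySem.Set String :=
  if altLabel destino ≠ "" then PySem.Set.add acc (altLabel destino) else acc

theorem pv_remember_eq (l : List String) (label : String)
    (hfix : PySem.Str.strip label = label) (hne : label ≠ "") :
    pyRemember (l, l) label = (PySem.Set.add l label, PySem.Set.add l label) := by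
  unfold pyRemember
  rw [hfix]
  simp only [hne]
  rcases hc : PySem.Set.contains l label with _ | _ <;>
    simp_all [PySem.Set.add, PySem.Set.contains]

theorem pv_stepA_eq (acc : PySem.Set String) (destino : List (String × String)) :
    (let cidade := PySem.Str.strip ((PySem.Dict.get? ⟨destino⟩ "cidade_nome").getD "")
     let uf := PySem.Str.upper (PySem.Str.strip ((PySem.Dict.get? ⟨destino⟩ "estado_sigla").getD ""))
     if cidade ≠ "" ∧ uf ≠ "" then pyRemember (acc, acc) (cidade ++ " " ++ uf)
     else if cidade ≠ "" then pyRemember (acc, acc) cidade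
     else (acc, acc))
    = (pvStep acc destino, pvStep acc destino) := by
  unfold pvStep altLabel
  set x := (PySem.Dict.get? (⟨destino⟩ : PySem.Dict String String) "cidade_nome").getD ""
  set y := (PySem.Dict.get? (⟨destino⟩ : PySem.Dict String String) "estado_sigla").getD ""
  by_cases hc : PySem.Str.strip x = ""
  · simp [hc]
  · by_cases hu : PySem.Str.upper (PySem.Str.strip y) = ""
    · have hrem := pv_remember_eq acc _ (pv_strip_idem x) hc
      simp [hc, hu, hrem]
    · have hne := pv_nonempty_cat (PySem.Str.strip x) (PySem.Str.upper (PySem.Str.strip y)) hc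
      have hrem := pv_remember_eq acc _ (pv_strip_cat x y hc hu) hne
      simp [hc, hu, hrem, hne]

theorem pv_foldl_pair (ds : List (List (String × String))) (acc : PySem.Set String) :
    ds.foldl
      (fun st destino =>
        let cidade := PySem.Str.strip ((PySem.Dict.get? ⟨destino⟩ "cidade_nome").getD "")
        let uf := PySem.Str.upper (PySem.Str.strip ((PySem.Dict.get? ⟨destino⟩ "estado_sigla").getD ""))
        if cidade ≠ "" ∧ uf ≠ "" then pyRemember st (cidade ++ " " ++ uf)
        else if cidade ≠ "" then pyRemember st cidade
        else st)
      (acc, acc)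
    = (ds.foldl pvStep acc, ds.foldl pvStep acc) := by
  induction ds generalizing acc with
  | nil => rfl
  | cons d t ih =>
    simp only [List.foldl_cons]
    rw [pv_stepA_eq acc d]
    exact ih (pvStep acc d)

-- folding Set.add ignores elements already contained in the accumulator
theorem pv_foldl_add_filter (xs : List String) (s : PySem.Set String) (a : String)
    (ha : a ∈ (s : List String)) :
    xs.foldl PySem.Set.add s = (xs.filter (fun y => y ≠ a)).foldl PySem.Set.add s := by
  induction xs generalizing s with
  | nil => rfl
  | cons x t ih =>
    by_cases hx : x = a
    · subst hx
      have : PySem.Set.add s x = s := by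
        simp [PySem.Set.add, PySem.Set.contains, ha]
      simp [this, ih s ha]
    · have ha' : a ∈ (PySem.Set.add s x : List String) := by
        simp [PySem.Set.add]; split <;> simp [ha]
      simp [hx, ih _ ha']

-- a head never seen again in the tail stays in front of the fold
theorem pv_foldl_add_cons (ys : List String) (s : List String) (x : String)
    (hx : x ∉ ys) :
    ys.foldl PySem.Set.add (x :: s) = x :: ys.foldl PySem.Set.add s := by
  induction ys generalizing s with
  | nil => rfl
  | cons y t ih =>
    have hyx : y ≠ x := fun h => hx (by simp [h])
    have hstep : PySem.Set.add (x :: s) y = x :: PySem.Set.add s y := by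
      simp [PySem.Set.add, PySem.Set.contains, hyx]
      split <;> simp
    simp only [List.foldl_cons, hstep]
    exact ih _ (fun h => hx (List.mem_cons_of_mem _ h))

-- Source B's recursive nub computes list(dict.fromkeys(...)) = PySem.List.dedup
theorem pv_nub_eq_dedup (l : List String) : pvNub l = PySem.List.dedup l := by
  induction hn : l.length using Nat.strong_induction_on generalizing l with
  | _ n ih =>
    cases l with
    | nil => rw [pvNub, PySem.List.dedup_eq_ofList]; rfl
    | cons x xs =>
    have hlt : (xs.filter (fun y => y ≠ x)).length < n := by
      subst hn
      exact Nat.lt_succ_of_le (List.length_filter_le _ _)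
    rw [pvNub, ih _ hlt _ rfl, PySem.List.dedup_eq_ofList, PySem.List.dedup_eq_ofList,
        PySem.Set.ofList, PySem.Set.ofList]
    simp only [List.foldl_cons]
    have h0 : PySem.Set.add PySem.Set.empty x = [x] := by
      simp [PySem.Set.add, PySem.Set.contains, PySem.Set.empty]
    have hnot : x ∉ xs.filter (fun y => y ≠ x) := by simp
    rw [h0, pv_foldl_add_filter xs [x] x (by simp), pv_foldl_add_cons _ [] x hnot]
    rfl

theorem pv_alt_foldl (ds : List (List (String × String))) :
    PySem.List.dedup ((ds.map altLabel).filter (fun s => s ≠ "")) = ds.foldl pvStep [] := by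
  rw [PySem.List.dedup_eq_ofList, PySem.Set.ofList]
  rw [List.foldl_filter, List.foldl_map]
  rw [show (fun (x : PySem.Set String) (y : List (String × String)) =>
        if (fun s => decide (s ≠ "")) (altLabel y) = true then PySem.Set.add x (altLabel y) else x)
      = pvStep from ?_]
  rfl
  funext s d
  simp [pvStep]

-- ===== VERDICT (by name: the statement is the Claim_ definition above) =====
theorem labels_from_destinos_json_py_spec : Claim_equal_labels_from_destinos_json_py := by
  intro destinos_json _
  unfold Spec_labels_from_destinos_json_py labels_from_destinos_json_py labels_from_destinos_json_py_alt
  rw [show ([] : List String) = PySem.Set.empty from rfl] at *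
  rw [pv_foldl_pair (destinos_json.getD []) PySem.Set.empty]
  rw [pv_nub_eq_dedup, pv_alt_foldl]
  rfl
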